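-- pv_equiv track=rewrite | github.com/kamistretta/mmis6391_mod05_mistretta_dupl | app/blueprints/functions.py | filter_movies
-- ===== SOURCE A (Python) =====
-- def filter_movies(movies, title=None, director=None, release_year=None):
--     """Filter movies based on title, director, and release year."""
--     filtered_movies = movies
--
--     if title:
--         filtered_movies = [movie for movie in filtered_movies if title.lower() in movie['title'].lower()]
--
--     if director:
--         filtered_movies = [movie for movie in filtered_movies if director.lower() in movie['director'].lower()]
--
--     if release_year:
--         filtered_movies = [movie for movie in filtered_movies if movie['release_year'] == release_year]
--
--     return filtered_movies
-- ===== SOURCE B (Python) =====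
-- def filter_movies(movies, title=None, director=None, release_year=None):
--     """Filter movies based on title, director, and release year (single pass)."""
--     if not title and not director and not release_year:
--         return movies
--     return [m for m in movies
--             if (not title or title.lower() in m['title'].lower())
--             and (not director or director.lower() in m['director'].lower())
--             and (not release_year or m['release_year'] == release_year)]
-- ===== Notes on version B (the rewrite author's own statement) =====
-- stated objective: simpler
-- what changed: Replaces A's three sequential filtering passes (one intermediate list per active criterion) by a single list comprehension whose short-circuit conjunction applies all active criteria in one traversal, with an early return of the same list when no criterion is active.
import Mathlib
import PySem

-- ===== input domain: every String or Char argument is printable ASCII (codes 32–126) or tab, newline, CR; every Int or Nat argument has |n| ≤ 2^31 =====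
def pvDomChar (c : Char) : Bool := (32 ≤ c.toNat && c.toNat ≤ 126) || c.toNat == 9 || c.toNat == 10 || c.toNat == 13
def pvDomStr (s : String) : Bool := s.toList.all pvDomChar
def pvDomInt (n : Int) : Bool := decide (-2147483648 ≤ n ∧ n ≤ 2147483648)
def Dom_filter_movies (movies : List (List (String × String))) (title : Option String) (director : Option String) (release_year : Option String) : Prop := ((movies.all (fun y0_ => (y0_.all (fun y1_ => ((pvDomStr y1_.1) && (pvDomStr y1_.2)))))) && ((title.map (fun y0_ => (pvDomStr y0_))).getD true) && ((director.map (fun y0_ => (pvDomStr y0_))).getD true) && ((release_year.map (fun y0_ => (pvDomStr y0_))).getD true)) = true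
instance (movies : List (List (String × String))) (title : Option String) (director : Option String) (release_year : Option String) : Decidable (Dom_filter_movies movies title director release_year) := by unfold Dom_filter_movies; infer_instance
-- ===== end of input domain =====

-- B replaces A's three sequential filtering passes by one single-pass comprehension
-- (with an early return of the list itself when no criterion is active): simpler, same results.
-- movie['k'] (KeyError on a missing key) is ported as (movie.lookup "k").getD ""; the default is
-- only reachable outside Pre_filter_movies, which excludes exactly the raising inputs.

-- ===== PORT A =====
def filter_movies (movies : List (List (String × String))) (title : Option String) (director : Option String) (release_year : Option String) : List (List (String × String)) :=
  let fm0 := movies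
  let fm1 :=
    match title with
    | none => fm0
    | some t => if t == "" then fm0 else
        fm0.filter (fun movie => PySem.Str.isIn (PySem.Str.lower t) (PySem.Str.lower ((movie.lookup "title").getD "")))
  let fm2 :=
    match director with
    | none => fm1
    | some d => if d == "" then fm1 else
        fm1.filter (fun movie => PySem.Str.isIn (PySem.Str.lower d) (PySem.Str.lower ((movie.lookup "director").getD "")))
  let fm3 :=
    match release_year with
    | none => fm2
    | some y => if y == "" then fm2 else
        fm2.filter (fun movie => (movie.lookup "release_year").getD "" == y)
  fm3

-- ===== PORT B =====
def filter_movies_alt (movies : List (List (String × String))) (title : Option String) (director : Option String) (release_year : Option String) : List (List (String × String)) :=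
  if title.getD "" == "" && director.getD "" == "" && release_year.getD "" == "" then movies
  else movies.filter (fun m =>
    (title.getD "" == "" || PySem.Str.isIn (PySem.Str.lower (title.getD "")) (PySem.Str.lower ((m.lookup "title").getD ""))) &&
    (director.getD "" == "" || PySem.Str.isIn (PySem.Str.lower (director.getD "")) (PySem.Str.lower ((m.lookup "director").getD ""))) &&
    (release_year.getD "" == "" || ((m.lookup "release_year").getD "" == release_year.getD "")))

-- ===== PRECONDITION & SPEC =====
-- helper predicates for Pre_ only: does a movie pass the title / director criterion
def pvPassT (title : Option String) (m : List (String × String)) : Bool :=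
  title.getD "" == "" || PySem.Str.isIn (PySem.Str.lower (title.getD "")) (PySem.Str.lower ((m.lookup "title").getD ""))
def pvPassD (director : Option String) (m : List (String × String)) : Bool :=
  director.getD "" == "" || PySem.Str.isIn (PySem.Str.lower (director.getD "")) (PySem.Str.lower ((m.lookup "director").getD ""))

-- Pre_ excludes exactly the inputs on which A raises KeyError: a movie reached by an active
-- criterion's pass (i.e. surviving the earlier active criteria) but lacking that criterion's key.
def Pre_filter_movies (movies : List (List (String × String))) (title : Option String) (director : Option String) (release_year : Option String) : Prop :=
  (title.getD "" ≠ "" → ∀ m ∈ movies, (m.lookup "title").isSome) ∧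
  (director.getD "" ≠ "" → ∀ m ∈ movies, pvPassT title m = true → (m.lookup "director").isSome) ∧
  (release_year.getD "" ≠ "" → ∀ m ∈ movies, pvPassT title m = true → pvPassD director m = true → (m.lookup "release_year").isSome)
instance (movies : List (List (String × String))) (title : Option String) (director : Option String) (release_year : Option String) : Decidable (Pre_filter_movies movies title director release_year) := by unfold Pre_filter_movies; infer_instance

def pvWitness_filter_movies : (List (List (String × String))) × Option String × Option String × Option String :=
  ([[("title", "Alien"), ("director", "Scott"), ("release_year", "1979")]], some "ali", none, some "1979")

def Spec_filter_movies (movies : List (List (String × String))) (title : Option String) (director : Option String) (release_year : Option String) (out : List (List (String × String))) : Prop := out = filter_movies_alt movies title director release_year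
instance (movies : List (List (String × String))) (title : Option String) (director : Option String) (release_year : Option String) (out : List (List (String × String))) : Decidable (Spec_filter_movies movies title director release_year out) := by unfold Spec_filter_movies; infer_instance

-- ===== CLAIM (what is proved, stated in full; the proofs are below) =====
def Claim_equal_filter_movies : Prop := ∀ (movies : List (List (String × String))) (title : Option String) (director : Option String) (release_year : Option String), Dom_filter_movies movies title director release_year → Pre_filter_movies movies title director release_year → Spec_filter_movies movies title director release_year (filter_movies movies title director release_year)

-- ===== LEMMAS AND PROOFS =====

-- ===== VERDICT (by name: the statement is the Claim_ definition above) =====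
theorem filter_movies_spec : Claim_equal_filter_movies := by
  intro movies title director release_year _ _
  unfold Spec_filter_movies filter_movies filter_movies_alt
  rcases title with _ | t <;> rcases director with _ | d <;> rcases release_year with _ | y
  all_goals try (cases ht : (t == "" : Bool))
  all_goals try (cases hd : (d == "" : Bool))
  all_goals try (cases hy : (y == "" : Bool))
  all_goals simp_all [beq_false_of_ne, List.filter_filter, Bool.and_comm]
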